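-- pv_equiv track=rewrite | github.com/idlespork/idlespork | idlesporklib/MultiLineRun.py | find_max_indent
-- ===== SOURCE A (Python) =====
-- INDENT_CHARS = set(" \t")
--
-- def find_max_indent(lines):
--     """
--     Return the common indentation shared by all lines,
--     not including empty and comment lines
--     """
--     Lcode = [line for line in lines
--              if line.rstrip() and not line.lstrip().startswith('#')]
--     indentation = []
--     idx = 0
--     while True:
--         cur_char = set(line[idx] for line in Lcode)
--         if len(cur_char) != 1: break
--         indent_char = list(cur_char)[0]
--         if indent_char not in INDENT_CHARS: break
--         indentation.append(indent_char)
--         idx += 1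
--     return "".join(indentation)
-- ===== SOURCE B (Python) =====
-- INDENT_CHARS = set(" \t")
--
-- def find_max_indent(lines):
--     """
--     Return the common indentation shared by all lines,
--     not including empty and comment lines
--     """
--     code = [line for line in lines
--             if line.rstrip() and not line.lstrip().startswith('#')]
--     if not code:
--         return ""
--     # row-wise: shrink a running common prefix against each further line
--     prefix = code[0]
--     for line in code[1:]:
--         prefix = _common_prefix(prefix, line)
--     # keep only the leading whitespace run of the common prefix
--     end = 0
--     while end < len(prefix) and prefix[end] in INDENT_CHARS:
--         end += 1
--     return prefix[:end]
--
-- def _common_prefix(a, b):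
--     out = []
--     for x, y in zip(a, b):
--         if x != y:
--             break
--         out.append(x)
--     return "".join(out)
-- ===== Notes on version B (the rewrite author's own statement) =====
-- stated objective: alternative
-- what changed: Replaces A's column-by-column scan that builds a set of the idx-th characters of all code lines with a row-wise fold computing the longest common prefix of the code lines, followed by one pass truncating that prefix at the first non-whitespace character.
import Mathlib
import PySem

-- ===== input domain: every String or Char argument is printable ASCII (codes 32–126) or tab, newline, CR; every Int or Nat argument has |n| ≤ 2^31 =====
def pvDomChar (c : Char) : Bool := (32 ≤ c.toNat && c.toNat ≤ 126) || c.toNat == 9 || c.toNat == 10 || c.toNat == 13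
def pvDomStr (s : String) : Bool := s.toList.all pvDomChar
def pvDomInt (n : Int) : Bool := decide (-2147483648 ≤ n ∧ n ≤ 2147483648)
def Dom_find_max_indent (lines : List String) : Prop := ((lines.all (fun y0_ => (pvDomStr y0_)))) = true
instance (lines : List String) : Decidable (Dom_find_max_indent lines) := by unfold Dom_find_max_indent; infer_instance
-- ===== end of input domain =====

-- B replaces A's column-by-column set-building scan with a row-wise common-prefix fold
-- followed by a whitespace-truncation pass (alternative decomposition, same asymptotic cost).


-- INDENT_CHARS = set(" \t"): membership test 'c in INDENT_CHARS' (shared module constant)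
def pvWs (c : Char) : Bool := c = ' ' || c = '\t'

-- the comprehension building Lcode, identical in A and in B:
-- [line for line in lines if line.rstrip() and not line.lstrip().startswith('#')]
def pvLcode (lines : List String) : List String :=
  lines.filter (fun line =>
    !((PySem.Str.rstrip line) == "") && !(PySem.Str.startswith (PySem.Str.lstrip line) "#"))

-- ===== PORT A =====
-- the 'while True' loop: cur_char = set(line[idx] for line in Lcode); break unless it is a
-- singleton {c} with c in INDENT_CHARS.  line[idx] is PySem.Str.pyGet?; a 'none' in the set
-- (IndexError in Python) is unreachable here because every line in Lcode has a non-whitespace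
-- character, so the catch-all branch is only ever taken where Python breaks.
-- Fuel: the loop advances idx and provably stops before the first line is exhausted, so
-- (total length of Lcode) + 1 steps always suffice.
def pvALoop (Lcode : List String) : Nat → Nat → List Char → List Char
  | 0, _, acc => acc
  | fuel+1, idx, acc =>
    match PySem.Set.ofList (Lcode.map (fun line => PySem.Str.pyGet? line (idx : Int))) with
    | [some c] => if pvWs c then pvALoop Lcode fuel (idx+1) (acc ++ [c]) else acc
    | _ => acc

def find_max_indent (lines : List String) : String :=
  let Lcode := pvLcode lines
  String.mk (pvALoop Lcode ((Lcode.map (fun l => l.toList.length)).sum + 1) 0 [])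

-- ===== PORT B =====
-- _common_prefix(a, b): zip the two strings, stop at the first mismatch
def pvCP : List Char → List Char → List Char
  | x :: a, y :: b => if x = y then x :: pvCP a b else []
  | _, _ => []

-- the final loop: keep the leading run of INDENT_CHARS characters of the prefix
def pvWsRun : List Char → List Char
  | [] => []
  | c :: cs => if pvWs c then c :: pvWsRun cs else []

def find_max_indent_alt (lines : List String) : String :=
  match pvLcode lines with
  | [] => ""
  | l :: rest =>
    String.mk (pvWsRun (rest.foldl (fun p line => pvCP p line.toList) l.toList))

-- ===== PRECONDITION & SPEC =====
def Spec_find_max_indent (lines : List String) (out : String) : Prop := out = find_max_indent_alt lines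
instance (lines : List String) (out : String) : Decidable (Spec_find_max_indent lines out) := by unfold Spec_find_max_indent; infer_instance

-- ===== CLAIM (what is proved, stated in full; the proofs are below) =====
def Claim_equal_find_max_indent : Prop := ∀ (lines : List String), Dom_find_max_indent lines → Spec_find_max_indent lines (find_max_indent lines)

-- ===== LEMMAS AND PROOFS =====

-- column-wise specification both ports are reduced to:
-- take the common head c of all lists as long as it exists and is whitespace
def pvCol : List Char → List (List Char) → List Char
  | [], _ => []
  | c :: t, ls =>
    if (∀ y ∈ ls, y.head? = some c) ∧ pvWs c then c :: pvCol t (ls.map List.tail) else []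

theorem pvCP_nil (y : List Char) : pvCP [] y = [] := by cases y <;> rfl

theorem foldl_pvCP_nil (ls : List (List Char)) : ls.foldl pvCP [] = [] := by
  induction ls with
  | nil => rfl
  | cons y ys ih => simpa [pvCP_nil] using ih

theorem foldl_pvCP_all_head (c : Char) (t : List Char) (ls : List (List Char))
    (h : ∀ y ∈ ls, y.head? = some c) :
    ls.foldl pvCP (c :: t) = c :: (ls.map List.tail).foldl pvCP t := by
  induction ls generalizing t with
  | nil => rfl
  | cons y ys ih =>
    obtain ⟨y', rfl⟩ : ∃ y', y = c :: y' := by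
      cases y with
      | nil => simp at h
      | cons a b =>
        have := h (a :: b) (by simp)
        simp at this
        exact ⟨b, by simp [this]⟩
    simp only [List.foldl_cons, List.map_cons, List.tail_cons, pvCP, if_pos]
    exact ih _ (fun z hz => h z (by simp [hz]))

theorem foldl_pvCP_bad (c : Char) (ls : List (List Char))
    (h : ∃ y ∈ ls, y.head? ≠ some c) :
    ∀ p, (p = [] ∨ ∃ t, p = c :: t) → ls.foldl pvCP p = [] := by
  induction ls with
  | nil => simp at h
  | cons y ys ih =>
    intro p hp
    rcases hp with rfl | ⟨t, rfl⟩
    · simpa [pvCP_nil] using foldl_pvCP_nil ys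
    · simp only [List.foldl_cons]
      rcases h with ⟨z, hz, hne⟩
      rcases List.mem_cons.mp hz with rfl | hzys
      · -- y itself disagrees at the head: the accumulator collapses to []
        have : pvCP (c :: t) z = [] := by
          cases z with
          | nil => rfl
          | cons a b =>
            have hac : a ≠ c := by intro h'; exact hne (by simp [h'])
            have hca : ¬ (c = a) := fun h' => hac h'.symm
            simp [pvCP, hca]
        rw [this]; exact foldl_pvCP_nil ys
      · -- the disagreeing line is further on; the accumulator keeps the required shape
        apply ih ⟨z, hzys, hne⟩
        cases y with
        | nil => left; rfl
        | cons a b =>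
          by_cases hac : c = a
          · subst hac; right; exact ⟨pvCP t b, by simp [pvCP]⟩
          · left; simp [pvCP, hac]

theorem wsRun_foldl_eq_col (l : List Char) (ls : List (List Char)) :
    pvWsRun (ls.foldl pvCP l) = pvCol l ls := by
  induction l generalizing ls with
  | nil => simp [foldl_pvCP_nil, pvWsRun, pvCol]
  | cons c t ih =>
    by_cases hall : ∀ y ∈ ls, y.head? = some c
    · rw [foldl_pvCP_all_head c t ls hall]
      by_cases hws : pvWs c
      · simp only [pvWsRun, pvCol]
        rw [if_pos hws, if_pos ⟨hall, hws⟩, ih]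
      · simp only [pvWsRun, pvCol]
        rw [if_neg hws, if_neg (fun h => hws h.2)]
    · push_neg at hall
      rw [foldl_pvCP_bad c ls (by simpa using hall) (c :: t) (Or.inr ⟨t, rfl⟩)]
      have : ¬ ((∀ y ∈ ls, y.head? = some c) ∧ pvWs c) := by
        intro ⟨h1, _⟩; rcases hall with ⟨z, hz, hne⟩; exact hne (h1 z hz)
      simp [pvWsRun, pvCol, this]

theorem ofList_all_eq {α : Type} [BEq α] [LawfulBEq α] (v : α) (xs : List α)
    (h : ∀ x ∈ xs, x = v) (hne : xs ≠ []) : PySem.Set.ofList xs = [v] := by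
  induction xs with
  | nil => simp at hne
  | cons x xs ih =>
    have hx : x = v := h x (by simp)
    subst hx
    cases xs with
    | nil => rfl
    | cons y ys =>
      have := ih (fun z hz => h z (by simp [List.mem_cons.mp hz])) (by simp)
      rw [PySem.Set.ofList_cons, this]
      simp [PySem.Set.discard]

theorem ofList_ne_singleton_of_two {α : Type} [BEq α] [LawfulBEq α] (a b : α) (xs : List α)
    (ha : a ∈ xs) (hb : b ∈ xs) (hab : a ≠ b) (w : α) : PySem.Set.ofList xs ≠ [w] := by
  intro h
  have h1 : a ∈ PySem.Set.ofList xs := (PySem.Set.mem_ofList _ _).mpr ha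
  have h2 : b ∈ PySem.Set.ofList xs := (PySem.Set.mem_ofList _ _).mpr hb
  rw [h] at h1 h2
  simp at h1 h2
  exact hab (h1.trans h2.symm)

theorem pvALoop_succ (Lcode : List String) (fuel idx : Nat) (acc : List Char) :
    pvALoop Lcode (fuel+1) idx acc =
      match PySem.Set.ofList (Lcode.map (fun line => PySem.Str.pyGet? line (idx : Int))) with
      | [some c] => if pvWs c then pvALoop Lcode fuel (idx+1) (acc ++ [c]) else acc
      | _ => acc := rfl

theorem pvALoop_eq_col (l0 : String) (rest : List String) :
    ∀ (fuel idx : Nat) (acc : List Char), l0.toList.length - idx < fuel →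
    pvALoop (l0 :: rest) fuel idx acc =
      acc ++ pvCol (l0.toList.drop idx) (rest.map (fun s => s.toList.drop idx)) := by
  intro fuel
  induction fuel with
  | zero => intro idx acc h; omega
  | succ fuel ih =>
    intro idx acc hfuel
    have hhead : ∀ (s : String), PySem.Str.pyGet? s (idx : Int) = (s.toList.drop idx).head? := by
      intro s
      simp [List.head?_drop]
    cases hd : l0.toList.drop idx with
    | nil =>
      -- l0 is exhausted: the set contains 'none', hence is never [some c]
      have h0 : PySem.Str.pyGet? l0 (idx : Int) = none := by rw [hhead, hd]; rfl
      have hmem : (none : Option Char) ∈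
          ((l0 :: rest).map (fun line => PySem.Str.pyGet? line (idx : Int))) :=
        List.mem_map.mpr ⟨l0, by simp, h0⟩
      have hnotnone : ∀ (c : Char),
          PySem.Set.ofList ((l0 :: rest).map (fun line => PySem.Str.pyGet? line (idx : Int)))
            ≠ [some c] := by
        intro c hEq
        have := (PySem.Set.mem_ofList _ _).mpr hmem
        rw [hEq] at this; simp at this
      rw [pvALoop_succ]
      rcases hS : PySem.Set.ofList ((l0 :: rest).map (fun line => PySem.Str.pyGet? line (idx : Int)))
        with _ | ⟨o, tl⟩
      · simp [pvCol]
      · cases o with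
        | none => cases tl <;> simp [pvCol]
        | some c =>
          cases tl with
          | nil => exact absurd hS (hnotnone c)
          | cons o' tl' => simp [pvCol]
    | cons c t =>
      have h0 : PySem.Str.pyGet? l0 (idx : Int) = some c := by rw [hhead, hd]; rfl
      by_cases hall : ∀ y ∈ rest.map (fun s => s.toList.drop idx), y.head? = some c
      · -- all lines agree at column idx
        have hset : PySem.Set.ofList ((l0 :: rest).map (fun line => PySem.Str.pyGet? line (idx : Int)))
            = [some c] := by
          apply ofList_all_eq
          · intro x hx
            simp only [List.mem_map, List.mem_cons] at hx
            rcases hx with ⟨s, hs | hs, rfl⟩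
            · subst hs; exact h0
            · rw [hhead]; exact hall _ (List.mem_map.mpr ⟨s, hs, rfl⟩)
          · simp
        rw [pvALoop_succ, hset]
        by_cases hws : pvWs c
        · simp only [if_pos hws]
          have hlen2 : (l0.toList.drop idx).length = t.length + 1 := by rw [hd]; rfl
          rw [List.length_drop] at hlen2
          rw [ih (idx + 1) (acc ++ [c]) (by omega)]
          have hdrop1 : l0.toList.drop (idx + 1) = t := by
            rw [← List.tail_drop, hd]; rfl
          have hmaps : rest.map (fun s => s.toList.drop (idx + 1))
              = (rest.map (fun s => s.toList.drop idx)).map List.tail := by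
            simp only [List.map_map]
            apply List.map_congr_left
            intro s _
            simp [← List.tail_drop]
          rw [hdrop1, hmaps]
          simp only [pvCol]
          rw [if_pos ⟨hall, hws⟩]
          simp
        · simp only [if_neg hws]
          simp only [pvCol]
          rw [if_neg (fun h => hws h.2)]
          simp
      · -- some line disagrees: the set has at least two distinct elements
        push_neg at hall
        rcases hall with ⟨z, hz, hne⟩
        rcases List.mem_map.mp hz with ⟨s, hs, rfl⟩
        have hzmem : (s.toList.drop idx).head? ∈
            ((l0 :: rest).map (fun line => PySem.Str.pyGet? line (idx : Int))) := by
          simp only [List.mem_map, List.mem_cons]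
          exact ⟨s, Or.inr hs, (hhead s)⟩
        have hcmem : (some c) ∈
            ((l0 :: rest).map (fun line => PySem.Str.pyGet? line (idx : Int))) := by
          simp only [List.mem_map, List.mem_cons]
          exact ⟨l0, Or.inl rfl, h0⟩
        have hnots : ∀ (w : Option Char),
            PySem.Set.ofList ((l0 :: rest).map (fun line => PySem.Str.pyGet? line (idx : Int)))
              ≠ [w] :=
          fun w => ofList_ne_singleton_of_two _ _ _ hcmem hzmem (fun h => hne h.symm) w
        have hcol' : pvCol (c :: t) (rest.map (fun s => s.toList.drop idx)) = [] := by
          simp only [pvCol]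
          rw [if_neg]
          rintro ⟨h1, -⟩; exact hne (h1 _ hz)
        rw [pvALoop_succ, hcol']
        rcases hS : PySem.Set.ofList ((l0 :: rest).map (fun line => PySem.Str.pyGet? line (idx : Int)))
          with _ | ⟨o, tl⟩
        · simp
        · cases o with
          | none => cases tl <;> simp
          | some c' =>
            cases tl with
            | nil => exact absurd hS (hnots (some c'))
            | cons o' tl' => simp

-- ===== VERDICT (by name: the statement is the Claim_ definition above) =====
theorem find_max_indent_spec : Claim_equal_find_max_indent := by
  intro lines _
  unfold Spec_find_max_indent find_max_indent find_max_indent_alt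
  cases hL : pvLcode lines with
  | nil => rfl
  | cons l0 rest =>
    simp only
    have hfuel : l0.toList.length - 0 <
        (((l0 :: rest).map (fun l => l.toList.length)).sum + 1) := by
      simp only [List.map_cons, List.sum_cons]
      omega
    rw [pvALoop_eq_col l0 rest _ 0 [] hfuel]
    simp only [List.drop_zero, List.nil_append]
    rw [← wsRun_foldl_eq_col, List.foldl_map]
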